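-- pv_equiv track=rewrite | github.com/abhaysajeev/query_builder | query_builder/utils/join_planner.py | find_join_path
-- ===== SOURCE A (Python) =====
-- from collections import deque
--
-- MAX_JOIN_DEPTH = 2
--
-- def find_join_path(base_doctype: str, target_doctype: str, graph: dict):
--     """
--     BFS search for join path.
--     Returns list of (from_doctype, field, to_doctype)
--     """
--     if base_doctype == target_doctype:
--         return []
--
--     queue = deque([(base_doctype, [])])
--     visited = {base_doctype}
--
--     while queue:
--         current, path = queue.popleft()
--
--         if len(path) >= MAX_JOIN_DEPTH:
--             continue
--
--         for field, next_dt in graph.get(current, {}).items():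
--             if next_dt in visited:
--                 continue
--
--             new_path = path + [(current, field, next_dt)]
--             if next_dt == target_doctype:
--                 return new_path
--
--             visited.add(next_dt)
--             queue.append((next_dt, new_path))
--
--     return None
-- ===== SOURCE B (Python) =====
-- MAX_JOIN_DEPTH = 2
--
-- def find_join_path(base_doctype: str, target_doctype: str, graph: dict):
--     """
--     Depth-limited join search (MAX_JOIN_DEPTH = 2) as two explicit levels.
--     Returns list of (from_doctype, field, to_doctype)
--     """
--     if base_doctype == target_doctype:
--         return []
--
--     # Level 1: first edge from base to each distinct reachable doctype.
--     first = {}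
--     for field, next_dt in graph.get(base_doctype, {}).items():
--         if next_dt == target_doctype:
--             return [(base_doctype, field, target_doctype)]
--         if next_dt != base_doctype and next_dt not in first:
--             first[next_dt] = field
--
--     # Level 2: first edge from a level-1 doctype that reaches the target.
--     for nd1, f1 in first.items():
--         for f2, nd2 in graph.get(nd1, {}).items():
--             if nd2 == target_doctype:
--                 return [(base_doctype, f1, nd1), (nd1, f2, target_doctype)]
--
--     return None
-- ===== Notes on version B (the rewrite author's own statement) =====
-- stated objective: simpler
-- what changed: Replaces A's generic BFS (deque of (node, path-list) states plus a visited set) by an explicit two-level search unrolled from the MAX_JOIN_DEPTH = 2 cutoff: a single pass over the base's edges building a first-edge dict, then one scan of those level-1 nodes' edges, with no queue, no visited set and no path copying.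
import Mathlib
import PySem

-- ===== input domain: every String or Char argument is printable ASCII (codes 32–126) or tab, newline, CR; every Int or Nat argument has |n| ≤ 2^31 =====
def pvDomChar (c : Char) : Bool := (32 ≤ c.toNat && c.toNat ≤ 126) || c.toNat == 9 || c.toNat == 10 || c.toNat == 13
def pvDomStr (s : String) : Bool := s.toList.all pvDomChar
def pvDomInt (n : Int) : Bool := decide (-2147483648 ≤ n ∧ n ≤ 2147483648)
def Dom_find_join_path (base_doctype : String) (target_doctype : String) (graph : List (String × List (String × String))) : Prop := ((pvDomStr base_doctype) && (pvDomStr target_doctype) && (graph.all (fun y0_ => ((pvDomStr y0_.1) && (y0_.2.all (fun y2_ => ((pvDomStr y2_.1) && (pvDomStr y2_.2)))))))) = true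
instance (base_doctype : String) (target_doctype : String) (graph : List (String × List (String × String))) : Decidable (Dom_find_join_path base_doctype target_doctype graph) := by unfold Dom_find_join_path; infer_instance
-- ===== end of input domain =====

-- B replaces A's queue-of-paths BFS by two explicit depth levels (MAX_JOIN_DEPTH = 2):
-- a first-edge dict from the base, then a scan of those level-1 nodes; objective: simpler.

-- ===== PORT A =====
-- graph.get(c, {}).items()  (shared by both ports: each Python does this same dict lookup)
def fjpAdj (graph : List (String × List (String × String))) (c : String) : List (String × String) :=
  (PySem.Dict.mk graph).getD c []

-- the body of A's `for field, next_dt in …` loop: early return (Sum.inl) or final (queue, visited)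
def fjpInner (target current : String) (path : List (String × String × String)) :
    List (String × String) → List (String × List (String × String × String)) → PySem.Set String →
    (List (String × String × String)) ⊕ (List (String × List (String × String × String)) × PySem.Set String)
  | [], q, v => Sum.inr (q, v)
  | (field, nd) :: tl, q, v =>
    if PySem.Set.contains v nd then fjpInner target current path tl q v
    else
      if nd = target then Sum.inl (path ++ [(current, field, nd)])
      else fjpInner target current path tl (q ++ [(nd, path ++ [(current, field, nd)])]) (PySem.Set.add v nd)

-- A's `while queue` loop (fuel bounds the number of iterations; 2 + 2*E + E*E, E = total edge
-- count, provably exceeds them, so the port computes exactly what A's loop computes)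
def fjpLoop (target : String) (graph : List (String × List (String × String))) :
    Nat → List (String × List (String × String × String)) → PySem.Set String →
    Option (List (String × String × String))
  | 0, _, _ => none
  | _ + 1, [], _ => none
  | fuel + 1, (current, path) :: rest, v =>
    if 2 ≤ path.length then fjpLoop target graph fuel rest v
    else
      match fjpInner target current path (fjpAdj graph current) rest v with
      | Sum.inl p => some p
      | Sum.inr (q, v') => fjpLoop target graph fuel q v'

def find_join_path (base_doctype : String) (target_doctype : String) (graph : List (String × List (String × String))) : Option (List (String × String × String)) :=
  if base_doctype = target_doctype then some []
  else
    let E := (graph.map (fun p => p.2.length)).sum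
    fjpLoop target_doctype graph (2 + 2 * E + E * E)
      [(base_doctype, [])] (PySem.Set.add PySem.Set.empty base_doctype)

-- ===== PORT B =====
-- B's level-1 loop: early return, or the dict `first` of first edges out of the base
def fjpAltL1 (base target : String) :
    List (String × String) → PySem.Dict String String →
    (List (String × String × String)) ⊕ PySem.Dict String String
  | [], first => Sum.inr first
  | (field, nd) :: tl, first =>
    if nd = target then Sum.inl [(base, field, target)]
    else if nd ≠ base ∧ first.contains nd = false then fjpAltL1 base target tl (first.insert nd field)
    else fjpAltL1 base target tl first

-- B's inner level-2 loop over graph.get(nd1, {}).items()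
def fjpAltL2Inner (base nd1 f1 target : String) :
    List (String × String) → Option (List (String × String × String))
  | [] => none
  | (f2, nd2) :: tl =>
    if nd2 = target then some [(base, f1, nd1), (nd1, f2, target)]
    else fjpAltL2Inner base nd1 f1 target tl

-- B's outer level-2 loop over first.items()
def fjpAltL2 (base target : String) (graph : List (String × List (String × String))) :
    List (String × String) → Option (List (String × String × String))
  | [] => none
  | (nd1, f1) :: tl =>
    match fjpAltL2Inner base nd1 f1 target (fjpAdj graph nd1) with
    | some r => some r
    | none => fjpAltL2 base target graph tl

def find_join_path_alt (base_doctype : String) (target_doctype : String) (graph : List (String × List (String × String))) : Option (List (String × String × String)) :=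
  if base_doctype = target_doctype then some []
  else
    match fjpAltL1 base_doctype target_doctype (fjpAdj graph base_doctype) PySem.Dict.empty with
    | Sum.inl p => some p
    | Sum.inr first => fjpAltL2 base_doctype target_doctype graph first.items

-- ===== PRECONDITION & SPEC =====
def Spec_find_join_path (base_doctype : String) (target_doctype : String) (graph : List (String × List (String × String))) (out : Option (List (String × String × String))) : Prop := out = find_join_path_alt base_doctype target_doctype graph
instance (base_doctype : String) (target_doctype : String) (graph : List (String × List (String × String))) (out : Option (List (String × String × String))) : Decidable (Spec_find_join_path base_doctype target_doctype graph out) := by unfold Spec_find_join_path; infer_instance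

-- ===== CLAIM (what is proved, stated in full; the proofs are below) =====
def Claim_equal_find_join_path : Prop := ∀ (base_doctype : String) (target_doctype : String) (graph : List (String × List (String × String))), Dom_find_join_path base_doctype target_doctype graph → Spec_find_join_path base_doctype target_doctype graph (find_join_path base_doctype target_doctype graph)

-- ===== LEMMAS AND PROOFS =====

-- the field of the first edge of adjl that reaches t (proof-side characterisation of both inner loops)
def fjpFirstTgt (t : String) : List (String × String) → Option String
  | [] => none
  | (f, nd) :: tl => if nd = t then some f else fjpFirstTgt t tl

-- proof-side characterisation of A's loop after level 1: scan level-1 items in order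
def fjpScan2 (t : String) (graph : List (String × List (String × String))) :
    List (String × List (String × String × String)) → Option (List (String × String × String))
  | [] => none
  | (nd1, p1) :: tl =>
    match fjpFirstTgt t (fjpAdj graph nd1) with
    | some f => some (p1 ++ [(nd1, f, t)])
    | none => fjpScan2 t graph tl

-- the queue item a `first`-dict entry corresponds to
def fjpPhi (b : String) (kv : String × String) : String × List (String × String × String) :=
  (kv.1, [(b, kv.2, kv.1)])

lemma fjpSet_contains_add (s : PySem.Set String) (y x : String) :
    PySem.Set.contains (PySem.Set.add s y) x = (x == y || PySem.Set.contains s x) := by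
  simp only [PySem.Set.add, PySem.Set.contains]
  by_cases hxy : x = y
  · subst hxy
    split_ifs with h
    · simp [List.mem_of_elem_eq_true h]
    · simp
  · have hb : (x == y) = false := by simpa using hxy
    split_ifs with h
    · simp [hb]
    · simp [hb, hxy]

lemma fjpAdj_len_le (graph : List (String × List (String × String))) (c : String) :
    (fjpAdj graph c).length ≤ (graph.map (fun p => p.2.length)).sum := by
  induction graph with
  | nil => simp [fjpAdj, PySem.Dict.getD, PySem.Dict.get?]
  | cons hd tl ih =>
    obtain ⟨k, l⟩ := hd
    by_cases hk : k = c
    · simp [fjpAdj, PySem.Dict.getD, PySem.Dict.get?_mk_cons, hk]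
    · have : fjpAdj ((k, l) :: tl) c = fjpAdj tl c := by
        simp [fjpAdj, PySem.Dict.getD, PySem.Dict.get?_mk_cons, hk]
      rw [this]
      simp only [List.map_cons, List.sum_cons]
      omega

-- A's inner loop hits the first target edge, regardless of visited (target never visited)
lemma fjpInner_some (t c : String) (p : List (String × String × String))
    (adjl : List (String × String)) (q : List (String × List (String × String × String)))
    (v : PySem.Set String) (hv : PySem.Set.contains v t = false) (f : String)
    (hf : fjpFirstTgt t adjl = some f) :
    fjpInner t c p adjl q v = Sum.inl (p ++ [(c, f, t)]) := by
  induction adjl generalizing q v with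
  | nil => simp [fjpFirstTgt] at hf
  | cons hd tl ih =>
    obtain ⟨fld, nd⟩ := hd
    simp only [fjpInner]
    by_cases hnd : nd = t
    · subst hnd
      have hf' : fld = f := by simpa [fjpFirstTgt] using hf
      subst hf'
      rw [if_neg (by rw [hv]; simp), if_pos rfl]
    · simp only [fjpFirstTgt, if_neg hnd] at hf
      by_cases h1 : PySem.Set.contains v nd = true
      · rw [if_pos h1]; exact ih q v hv hf
      · rw [if_neg h1, if_neg hnd]
        exact ih _ _ (by rw [fjpSet_contains_add, hv]; simpa using fun h => hnd h.symm) hf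

-- when no edge reaches t, A's inner loop extends the queue with |p|+1-length paths only
lemma fjpInner_none (t c : String) (p : List (String × String × String))
    (adjl : List (String × String)) (q : List (String × List (String × String × String)))
    (v : PySem.Set String) (hv : PySem.Set.contains v t = false)
    (hf : fjpFirstTgt t adjl = none) :
    ∃ new v', fjpInner t c p adjl q v = Sum.inr (q ++ new, v') ∧
      (∀ x ∈ new, x.2.length = p.length + 1) ∧ new.length ≤ adjl.length ∧
      PySem.Set.contains v' t = false := by
  induction adjl generalizing q v with
  | nil => exact ⟨[], v, by simp [fjpInner], by simp, by simp, hv⟩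
  | cons hd tl ih =>
    obtain ⟨fld, nd⟩ := hd
    have hnd : nd ≠ t := by
      intro h; subst h; simp [fjpFirstTgt] at hf
    simp only [fjpFirstTgt, if_neg hnd] at hf
    simp only [fjpInner]
    by_cases h1 : PySem.Set.contains v nd = true
    · rw [if_pos h1]
      obtain ⟨new, v', he, h2, h3, h4⟩ := ih q v hv hf
      exact ⟨new, v', he, h2, by simpa using Nat.le_succ_of_le h3, h4⟩
    · rw [if_neg h1, if_neg hnd]
      obtain ⟨new, v', he, h2, h3, h4⟩ :=
        ih (q ++ [(nd, p ++ [(c, fld, nd)])])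
          (PySem.Set.add v nd)
          (by rw [fjpSet_contains_add, hv]; simpa using fun h => hnd h.symm) hf
      rw [List.append_assoc] at he
      refine ⟨(nd, p ++ [(c, fld, nd)]) :: new, v', by simpa using he, ?_, by simpa using h3, h4⟩
      intro x hx
      rcases List.mem_cons.mp hx with hx | hx
      · subst hx; simp
      · exact h2 x hx

-- A's loop, once every queued path has length 1 (then 2): scan the level-1 items in order
lemma fjpLoop_scan2 (t : String) (graph : List (String × List (String × String))) :
    ∀ (fuel : Nat) (xs ys : List (String × List (String × String × String))) (v : PySem.Set String),
    (∀ x ∈ xs, x.2.length = 1) → (∀ y ∈ ys, 2 ≤ y.2.length) →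
    PySem.Set.contains v t = false →
    xs.length + ys.length + ((xs.map (fun x => (fjpAdj graph x.1).length)).sum) ≤ fuel →
    fjpLoop t graph fuel (xs ++ ys) v = fjpScan2 t graph xs := by
  intro fuel
  induction fuel with
  | zero =>
    intro xs ys v hxs hys hv hb
    have hx : xs = [] := by cases xs <;> simp_all
    have hy : ys = [] := by cases ys <;> simp_all
    subst hx; subst hy
    simp [fjpLoop, fjpScan2]
  | succ fuel ih =>
    intro xs ys v hxs hys hv hb
    cases xs with
    | nil =>
      cases ys with
      | nil => simp [fjpLoop, fjpScan2]
      | cons y ys' =>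
        obtain ⟨c, p⟩ := y
        have h2 : 2 ≤ p.length := hys (c, p) (by simp)
        simp only [List.nil_append, fjpLoop, if_pos h2, fjpScan2]
        have := ih [] ys' v (by simp) (fun y hy => hys y (by simp [hy])) hv (by simp at hb ⊢; omega)
        simpa [fjpScan2] using this
    | cons x xs' =>
      obtain ⟨c, p⟩ := x
      have hp : p.length = 1 := hxs (c, p) (by simp)
      have hnotle : ¬ 2 ≤ p.length := by omega
      simp only [List.cons_append, fjpLoop, if_neg hnotle]
      cases hft : fjpFirstTgt t (fjpAdj graph c) with
      | some f =>
        rw [fjpInner_some t c p _ _ v hv f hft]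
        simp [fjpScan2, hft]
      | none =>
        obtain ⟨new, v', he, h2, h3, h4⟩ := fjpInner_none t c p (fjpAdj graph c) (xs' ++ ys) v hv hft
        rw [he]
        show fjpLoop t graph fuel (xs' ++ ys ++ new) v' = fjpScan2 t graph ((c, p) :: xs')
        have hys' : ∀ y ∈ ys ++ new, 2 ≤ y.2.length := by
          intro y hy
          rcases List.mem_append.mp hy with hy | hy
          · exact hys y hy
          · have := h2 y hy; omega
        have hb' : xs'.length + (ys ++ new).length +
            ((xs'.map (fun x => (fjpAdj graph x.1).length)).sum) ≤ fuel := by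
          simp only [List.length_append]
          simp only [List.length_cons, List.map_cons, List.sum_cons, List.length_append] at hb
          omega
        have := ih xs' (ys ++ new) v' (fun x hx => hxs x (by simp [hx])) hys' h4 hb'
        rw [List.append_assoc, this]
        simp [fjpScan2, hft]

-- level 1: A's inner loop from the base tracks B's `first`-dict loop
lemma fjpL1_corr (b t : String) (ht : t ≠ b) :
    ∀ (adjl : List (String × String)) (d : PySem.Dict String String) (v : PySem.Set String),
    (∀ x, PySem.Set.contains v x = true ↔ (x = b ∨ d.contains x = true)) →
    d.contains t = false →
    (∀ r, fjpAltL1 b t adjl d = Sum.inl r →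
        fjpInner t b [] adjl (d.items.map (fjpPhi b)) v = Sum.inl r) ∧
    (∀ d', fjpAltL1 b t adjl d = Sum.inr d' →
        ∃ v', fjpInner t b [] adjl (d.items.map (fjpPhi b)) v = Sum.inr (d'.items.map (fjpPhi b), v') ∧
          PySem.Set.contains v' t = false ∧
          d'.contains t = false ∧ d'.items.length ≤ d.items.length + adjl.length) := by
  intro adjl
  induction adjl with
  | nil =>
    intro d v hv htd
    have hvt : PySem.Set.contains v t = false := by
      cases hc : PySem.Set.contains v t with
      | false => rfl
      | true =>
        rcases (hv t).mp hc with h' | h'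
        · exact absurd h' ht
        · rw [htd] at h'; exact absurd h' (by simp)
    constructor
    · intro r hr; simp [fjpAltL1] at hr
    · intro d' hd'
      simp only [fjpAltL1] at hd'
      cases hd'
      exact ⟨v, by simp [fjpInner], hvt, htd, by simp⟩
  | cons hd tl ih =>
    intro d v hv htd
    obtain ⟨fld, nd⟩ := hd
    have hvt : PySem.Set.contains v t = false := by
      cases hc : PySem.Set.contains v t with
      | false => rfl
      | true =>
        rcases (hv t).mp hc with h' | h'
        · exact absurd h' ht
        · rw [htd] at h'; exact absurd h' (by simp)
    by_cases hnd : nd = t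
    · subst hnd
      constructor
      · intro r hr
        simp only [fjpAltL1, if_pos rfl] at hr
        cases hr
        simp only [fjpInner]
        rw [if_neg (by rw [hvt]; simp)]
        simp
      · intro d' hd'
        simp [fjpAltL1] at hd'
    · by_cases hskip : nd = b ∨ d.contains nd = true
      · have hvnd : PySem.Set.contains v nd = true := (hv nd).mpr hskip
        have hB : fjpAltL1 b t ((fld, nd) :: tl) d = fjpAltL1 b t tl d := by
          simp only [fjpAltL1, if_neg hnd]
          rw [if_neg]
          rintro ⟨h1, h2⟩
          rcases hskip with h | h
          · exact h1 h
          · rw [h] at h2; exact absurd h2 (by simp)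
        have hA : fjpInner t b [] ((fld, nd) :: tl) (d.items.map (fjpPhi b)) v =
            fjpInner t b [] tl (d.items.map (fjpPhi b)) v := by
          simp only [fjpInner]
          rw [if_pos hvnd]
        rw [hA, hB] at *
        obtain ⟨c1, c2⟩ := ih d v hv htd
        refine ⟨fun r hr => c1 r hr, fun d' hd' => ?_⟩
        obtain ⟨v', he, hvt', h2, h3⟩ := c2 d' hd'
        exact ⟨v', he, hvt', h2, by simp only [List.length_cons]; omega⟩
      · push_neg at hskip
        obtain ⟨hnb, hndc⟩ := hskip
        have hndc' : d.contains nd = false := by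
          cases hc : d.contains nd with
          | false => rfl
          | true => exact absurd hc hndc
        have hvnd : PySem.Set.contains v nd = false := by
          cases hc : PySem.Set.contains v nd with
          | false => rfl
          | true =>
            rcases (hv nd).mp hc with h' | h'
            · exact absurd h' hnb
            · exact absurd h' hndc
        have hB : fjpAltL1 b t ((fld, nd) :: tl) d = fjpAltL1 b t tl (d.insert nd fld) := by
          simp only [fjpAltL1, if_neg hnd]
          rw [if_pos ⟨hnb, hndc'⟩]
        have hitems : (d.insert nd fld).items.map (fjpPhi b) =
            d.items.map (fjpPhi b) ++ [(nd, [(b, fld, nd)])] := by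
          rw [PySem.Dict.items_insert_of_not_contains d fld hndc']
          simp [fjpPhi]
        have hA : fjpInner t b [] ((fld, nd) :: tl) (d.items.map (fjpPhi b)) v =
            fjpInner t b [] tl ((d.insert nd fld).items.map (fjpPhi b)) (PySem.Set.add v nd) := by
          simp only [fjpInner]
          rw [if_neg (by rw [hvnd]; simp), if_neg hnd, hitems]
          simp
        have hv' : ∀ x, PySem.Set.contains (PySem.Set.add v nd) x = true ↔
            (x = b ∨ (d.insert nd fld).contains x = true) := by
          intro x
          rw [fjpSet_contains_add, PySem.Dict.contains_insert]
          constructor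
          · intro h
            rcases Bool.or_eq_true_iff.mp h with h | h
            · right; simp [beq_iff_eq.mp h]
            · rcases (hv x).mp h with h' | h'
              · exact Or.inl h'
              · right; simp [h']
          · intro h
            rcases h with h | h
            · exact Bool.or_eq_true_iff.mpr (Or.inr ((hv x).mpr (Or.inl h)))
            · rcases Bool.or_eq_true_iff.mp h with h | h
              · exact Bool.or_eq_true_iff.mpr (Or.inl h)
              · exact Bool.or_eq_true_iff.mpr (Or.inr ((hv x).mpr (Or.inr h)))
        have htd' : (d.insert nd fld).contains t = false := by
          rw [PySem.Dict.contains_insert]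
          simp [htd]
          exact fun h => hnd h.symm
        rw [hA, hB]
        obtain ⟨c1, c2⟩ := ih (d.insert nd fld) (PySem.Set.add v nd) hv' htd'
        refine ⟨fun r hr => c1 r hr, fun d' hd' => ?_⟩
        obtain ⟨v', he, hvt2, h2, h3⟩ := c2 d' hd'
        refine ⟨v', he, hvt2, h2, ?_⟩
        rw [PySem.Dict.items_insert_of_not_contains d fld hndc'] at h3
        simp only [List.length_append, List.length_cons, List.length_nil] at h3 ⊢
        omega

-- B's inner level-2 loop is the first-target-edge scan
lemma fjpAltL2Inner_eq (b nd1 f1 t : String) (adjl : List (String × String)) :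
    fjpAltL2Inner b nd1 f1 t adjl =
      (fjpFirstTgt t adjl).map (fun f2 => [(b, f1, nd1), (nd1, f2, t)]) := by
  induction adjl with
  | nil => simp [fjpAltL2Inner, fjpFirstTgt]
  | cons hd tl ih =>
    obtain ⟨f2, nd2⟩ := hd
    by_cases h : nd2 = t
    · simp [fjpAltL2Inner, fjpFirstTgt, h]
    · simp [fjpAltL2Inner, fjpFirstTgt, h, ih]

-- the level-2 characterisation of A equals B's level-2 double loop
lemma fjpScan2_map (b t : String) (graph : List (String × List (String × String)))
    (items : List (String × String)) :
    fjpScan2 t graph (items.map (fjpPhi b)) = fjpAltL2 b t graph items := by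
  induction items with
  | nil => simp [fjpScan2, fjpAltL2]
  | cons hd tl ih =>
    obtain ⟨nd1, f1⟩ := hd
    simp only [List.map_cons, fjpPhi, fjpScan2, fjpAltL2, fjpAltL2Inner_eq]
    cases hft : fjpFirstTgt t (fjpAdj graph nd1) with
    | some f => simp
    | none => simpa using ih

-- ===== VERDICT (by name: the statement is the Claim_ definition above) =====
theorem find_join_path_spec : Claim_equal_find_join_path := by
  intro b t g _
  unfold Spec_find_join_path find_join_path find_join_path_alt
  by_cases hbt : b = t
  · simp [hbt]
  · simp only [if_neg hbt]
    set E := (g.map (fun p => p.2.length)).sum with hE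
    have hv0 : ∀ x, PySem.Set.contains (PySem.Set.add PySem.Set.empty b) x = true ↔
        (x = b ∨ (PySem.Dict.empty : PySem.Dict String String).contains x = true) := by
      intro x
      rw [fjpSet_contains_add]
      simp [PySem.Set.contains, PySem.Set.empty, PySem.Dict.contains, PySem.Dict.empty]
    have htb : t ≠ b := fun h => hbt h.symm
    obtain ⟨c1, c2⟩ := fjpL1_corr b t htb (fjpAdj g b) PySem.Dict.empty
      (PySem.Set.add PySem.Set.empty b) hv0 (by simp [PySem.Dict.contains, PySem.Dict.empty])
    have hstep : fjpLoop t g (2 + 2 * E + E * E) [(b, [])] (PySem.Set.add PySem.Set.empty b) =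
        match fjpInner t b [] (fjpAdj g b) [] (PySem.Set.add PySem.Set.empty b) with
        | Sum.inl p => some p
        | Sum.inr (q, v') => fjpLoop t g (1 + 2 * E + E * E) q v' := by
      have h2 : 2 + 2 * E + E * E = (1 + 2 * E + E * E) + 1 := by omega
      rw [h2]
      simp [fjpLoop]
    rw [hstep]
    cases hL1 : fjpAltL1 b t (fjpAdj g b) PySem.Dict.empty with
    | inl p =>
      have hc := c1 p hL1
      simp only [PySem.Dict.empty, PySem.Dict.items, List.map_nil] at hc
      rw [hc]
    | inr d' =>
      obtain ⟨v', he, hvt', htd', hlen⟩ := c2 d' hL1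
      simp only [PySem.Dict.empty, PySem.Dict.items, List.map_nil] at he
      rw [he]
      show fjpLoop t g (1 + 2 * E + E * E) (d'.items.map (fjpPhi b)) v' = fjpAltL2 b t g d'.items
      have hlen' : d'.items.length ≤ E := by
        have := fjpAdj_len_le g b
        simp only [PySem.Dict.empty, PySem.Dict.items, List.length_nil] at hlen
        omega
      have hbound : (d'.items.map (fjpPhi b)).length + ([] : List (String × List (String × String × String))).length +
          (((d'.items.map (fjpPhi b)).map (fun x => (fjpAdj g x.1).length)).sum) ≤ 1 + 2 * E + E * E := by
        have hsum : (((d'.items.map (fjpPhi b)).map (fun x => (fjpAdj g x.1).length)).sum) ≤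
            (d'.items.map (fjpPhi b)).length * E := by
          have := List.sum_le_card_nsmul ((d'.items.map (fjpPhi b)).map (fun x => (fjpAdj g x.1).length)) E
            (by
              intro x hx
              simp only [List.mem_map] at hx
              obtain ⟨y, _, rfl⟩ := hx
              exact fjpAdj_len_le g y.1)
          simpa [smul_eq_mul] using this
        have hlm : (d'.items.map (fjpPhi b)).length ≤ E := by simpa using hlen'
        have : (d'.items.map (fjpPhi b)).length * E ≤ E * E := Nat.mul_le_mul_right E hlm
        simp only [List.length_nil]
        omega
      have := fjpLoop_scan2 t g (1 + 2 * E + E * E) (d'.items.map (fjpPhi b)) [] v'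
        (by intro x hx; simp only [List.mem_map] at hx; obtain ⟨y, _, rfl⟩ := hx; simp [fjpPhi])
        (by simp) hvt' hbound
      simp only [List.append_nil] at this
      rw [this, fjpScan2_map]
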